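-- pv_equiv track=rewrite | github.com/lessen/src | cliffsDelta.py | cdSimple
-- ===== SOURCE A (Python) =====
-- def cdSimple(lst1,lst2):
--   "Simple, shows basic idea"
--   lt=gt=n=0
--   for x in lst1:
--     for y in lst2:
--       n += 1
--       if x > y: gt +=1
--       if x < y: lt +=1
--   return lt,gt,n
-- ===== SOURCE B (Python) =====
-- def _bisect_left(a, x):
--     lo, hi = 0, len(a)
--     while lo < hi:
--         mid = (lo + hi) // 2
--         if a[mid] < x:
--             lo = mid + 1
--         else:
--             hi = mid
--     return lo
--
--
-- def _bisect_right(a, x):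
--     lo, hi = 0, len(a)
--     while lo < hi:
--         mid = (lo + hi) // 2
--         if x < a[mid]:
--             hi = mid
--         else:
--             lo = mid + 1
--     return lo
--
--
-- def cdSimple(lst1, lst2):
--     "Sort lst2 once, then count dominances per x by binary search"
--     s = sorted(lst2)
--     m = len(s)
--     lt = gt = 0
--     for x in lst1:
--         lt += m - _bisect_right(s, x)
--         gt += _bisect_left(s, x)
--     return lt, gt, len(lst1) * m
-- ===== Notes on version B (the rewrite author's own statement) =====
-- stated objective: faster
-- what changed: Replaces the nested O(n*m) comparison loops by sorting lst2 once and counting, for each x in lst1, the elements below/above x with binary search (and computing n as len(lst1)*len(lst2)).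
import Mathlib
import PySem

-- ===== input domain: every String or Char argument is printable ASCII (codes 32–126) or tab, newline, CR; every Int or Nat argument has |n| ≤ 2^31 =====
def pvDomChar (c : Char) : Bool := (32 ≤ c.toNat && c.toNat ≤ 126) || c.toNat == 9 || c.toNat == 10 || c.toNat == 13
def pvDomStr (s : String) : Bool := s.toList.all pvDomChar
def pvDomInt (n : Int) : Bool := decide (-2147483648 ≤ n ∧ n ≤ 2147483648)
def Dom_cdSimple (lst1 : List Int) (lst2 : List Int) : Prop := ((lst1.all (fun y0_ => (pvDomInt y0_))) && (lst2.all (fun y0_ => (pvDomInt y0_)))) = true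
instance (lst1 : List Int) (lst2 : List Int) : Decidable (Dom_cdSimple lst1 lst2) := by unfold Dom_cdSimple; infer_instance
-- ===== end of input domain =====

-- B sorts lst2 once and counts, per x, the below/above elements by binary search instead of A's nested loops.

-- ===== PORT A =====
-- the inner 'for y in lst2' body of A, on the state (lt, gt, n)
def cdSimpleStep (x : Int) (s : Int × Int × Int) (y : Int) : Int × Int × Int :=
  let n := s.2.2 + 1
  let gt := if x > y then s.2.1 + 1 else s.2.1
  let lt := if x < y then s.1 + 1 else s.1
  (lt, gt, n)

def cdSimple (lst1 : List Int) (lst2 : List Int) : List Int :=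
  let r := lst1.foldl (fun s x => lst2.foldl (cdSimpleStep x) s) (0, 0, 0)
  [r.1, r.2.1, r.2.2]

-- ===== PORT B =====
-- Source B's _bisect_left/_bisect_right are the textbook lo/hi binary-search loops,
-- identical to PySem.List.bisectLeft / bisectRight, which are used as their ports.
def cdSimple_alt (lst1 : List Int) (lst2 : List Int) : List Int :=
  let s := PySem.List.sorted lst2 (fun z => z) false
  let m := s.length
  let r := lst1.foldl
    (fun (p : Int × Int) x =>
      (p.1 + ((m : Int) - (PySem.List.bisectRight s x : Int)),
       p.2 + (PySem.List.bisectLeft s x : Int)))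
    (0, 0)
  [r.1, r.2, (lst1.length : Int) * (m : Int)]

-- ===== PRECONDITION & SPEC =====
def Spec_cdSimple (lst1 : List Int) (lst2 : List Int) (out : List Int) : Prop := out = cdSimple_alt lst1 lst2
instance (lst1 : List Int) (lst2 : List Int) (out : List Int) : Decidable (Spec_cdSimple lst1 lst2 out) := by unfold Spec_cdSimple; infer_instance

-- ===== CLAIM (what is proved, stated in full; the proofs are below) =====
def Claim_equal_cdSimple : Prop := ∀ (lst1 : List Int) (lst2 : List Int), Dom_cdSimple lst1 lst2 → Spec_cdSimple lst1 lst2 (cdSimple lst1 lst2)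

-- ===== LEMMAS AND PROOFS =====

-- per-x counts over lst2
def cntGT (lst2 : List Int) (x : Int) : Int := (lst2.countP (fun y => decide (y < x)) : Int)
def cntLT (lst2 : List Int) (x : Int) : Int := (lst2.countP (fun y => decide (x < y)) : Int)

-- A's inner loop adds (cntLT, cntGT, length) to the state
theorem inner_eq (x : Int) (lst2 : List Int) (s : Int × Int × Int) :
    lst2.foldl (cdSimpleStep x) s
      = (s.1 + cntLT lst2 x, s.2.1 + cntGT lst2 x, s.2.2 + (lst2.length : Int)) := by
  induction lst2 generalizing s with
  | nil => simp [cntLT, cntGT]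
  | cons y t ih =>
    rw [List.foldl_cons, ih]
    obtain ⟨lt, gt, n⟩ := s
    simp only [cntLT, cntGT, cdSimpleStep, List.countP_cons, List.length_cons]
    by_cases h1 : x < y <;> by_cases h2 : y < x <;>
      simp [h1, h2, Prod.ext_iff] <;> omega

-- A's outer loop accumulates the sums
theorem outer_A (lst1 lst2 : List Int) (s : Int × Int × Int) :
    lst1.foldl (fun s x => lst2.foldl (cdSimpleStep x) s) s
      = (s.1 + (lst1.map (cntLT lst2)).sum,
         s.2.1 + (lst1.map (cntGT lst2)).sum,
         s.2.2 + (lst1.length : Int) * (lst2.length : Int)) := by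
  induction lst1 generalizing s with
  | nil => simp
  | cons x t ih =>
    rw [List.foldl_cons, inner_eq, ih]
    obtain ⟨lt, gt, n⟩ := s
    simp only [List.map_cons, List.sum_cons, List.length_cons]
    refine Prod.ext ?_ (Prod.ext ?_ ?_) <;> simp <;> ring

-- binary search counts: on a sorted list, bisectLeft counts the elements < x
theorem bisectLeft_count (s : List Int) (x : Int)
    (hs : List.Pairwise (fun a b => a ≤ b) s) :
    PySem.List.bisectLeft s x = s.countP (fun y => decide (y < x)) := by
  obtain ⟨hk, hlo, hhi⟩ := PySem.List.bisectLeft_spec s x hs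
  set k := PySem.List.bisectLeft s x with hkdef
  have hsplit := List.take_append_drop k s
  have h1 : (s.take k).countP (fun y => decide (y < x)) = (s.take k).length := by
    rw [List.countP_eq_length]
    intro a ha
    rw [List.mem_take_iff_getElem] at ha
    obtain ⟨j, hj, rfl⟩ := ha
    simpa using hlo j (lt_min_iff.mp hj).2 (lt_min_iff.mp hj).1
  have h2 : (s.drop k).countP (fun y => decide (y < x)) = 0 := by
    rw [List.countP_eq_zero]
    intro a ha
    rw [List.mem_drop_iff_getElem] at ha
    obtain ⟨j, hj, rfl⟩ := ha
    have hjk : k + j < s.length := by omega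
    simpa using not_lt.mpr (hhi (k + j) hjk (Nat.le_add_right k j))
  calc PySem.List.bisectLeft s x = (s.take k).length := by
        rw [List.length_take, Nat.min_eq_left hk]
    _ = s.countP (fun y => decide (y < x)) := by
        conv_rhs => rw [← hsplit]
        rw [List.countP_append, h1, h2]
        omega

-- on a sorted list, bisectRight counts the elements ≤ x
theorem bisectRight_count (s : List Int) (x : Int)
    (hs : List.Pairwise (fun a b => a ≤ b) s) :
    PySem.List.bisectRight s x = s.countP (fun y => decide (y ≤ x)) := by
  obtain ⟨hk, hlo, hhi⟩ := PySem.List.bisectRight_spec s x hs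
  set k := PySem.List.bisectRight s x with hkdef
  have hsplit := List.take_append_drop k s
  have h1 : (s.take k).countP (fun y => decide (y ≤ x)) = (s.take k).length := by
    rw [List.countP_eq_length]
    intro a ha
    rw [List.mem_take_iff_getElem] at ha
    obtain ⟨j, hj, rfl⟩ := ha
    simpa using hlo j (lt_min_iff.mp hj).2 (lt_min_iff.mp hj).1
  have h2 : (s.drop k).countP (fun y => decide (y ≤ x)) = 0 := by
    rw [List.countP_eq_zero]
    intro a ha
    rw [List.mem_drop_iff_getElem] at ha
    obtain ⟨j, hj, rfl⟩ := ha
    have hjk : k + j < s.length := by omega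
    simpa using not_le.mpr (hhi (k + j) hjk (Nat.le_add_right k j))
  calc PySem.List.bisectRight s x = (s.take k).length := by
        rw [List.length_take, Nat.min_eq_left hk]
    _ = s.countP (fun y => decide (y ≤ x)) := by
        conv_rhs => rw [← hsplit]
        rw [List.countP_append, h1, h2]
        omega

-- per-x contributions of B equal A's counts
theorem gt_contrib (lst2 : List Int) (x : Int) :
    (PySem.List.bisectLeft (PySem.List.sorted lst2 (fun z => z) false) x : Int)
      = cntGT lst2 x := by
  have hp := PySem.List.sorted_pairwise lst2 (fun z => z)
  rw [cntGT, bisectLeft_count _ x hp,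
    (PySem.List.sorted_perm lst2 (fun z => z) false).countP_eq]

theorem lt_contrib (lst2 : List Int) (x : Int) :
    ((PySem.List.sorted lst2 (fun z => z) false).length : Int)
        - (PySem.List.bisectRight (PySem.List.sorted lst2 (fun z => z) false) x : Int)
      = cntLT lst2 x := by
  have hp := PySem.List.sorted_pairwise lst2 (fun z => z)
  set s := PySem.List.sorted lst2 (fun z => z) false with hsdef
  have hlen : s.length = s.countP (fun y => decide (y ≤ x))
      + s.countP (fun y => decide (x < y)) := by
    have := List.length_eq_countP_add_countP (l := s) (fun y => decide (y ≤ x))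
    have he : (fun a => decide (¬(decide (a ≤ x)) = true)) = (fun y => decide (x < y)) := by
      funext a; simp only [decide_eq_decide, decide_eq_true_eq]; omega
    rwa [he] at this
  rw [bisectRight_count _ x hp, cntLT,
    ← (PySem.List.sorted_perm lst2 (fun z => z) false).countP_eq (fun y => decide (x < y))]
  rw [← hsdef]
  omega

-- B's fold accumulates the same sums
theorem outer_B (lst1 lst2 : List Int) (p : Int × Int) :
    lst1.foldl
      (fun (p : Int × Int) x =>
        (p.1 + (((PySem.List.sorted lst2 (fun z => z) false).length : Int)
            - (PySem.List.bisectRight (PySem.List.sorted lst2 (fun z => z) false) x : Int)),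
         p.2 + (PySem.List.bisectLeft (PySem.List.sorted lst2 (fun z => z) false) x : Int)))
      p
      = (p.1 + (lst1.map (cntLT lst2)).sum, p.2 + (lst1.map (cntGT lst2)).sum) := by
  induction lst1 generalizing p with
  | nil => simp
  | cons x t ih =>
    rw [List.foldl_cons, ih]
    obtain ⟨a, b⟩ := p
    simp only [List.map_cons, List.sum_cons, lt_contrib, gt_contrib]
    refine Prod.ext ?_ ?_ <;> simp <;> ring

-- ===== VERDICT (by name: the statement is the Claim_ definition above) =====
theorem cdSimple_spec : Claim_equal_cdSimple := by
  intro lst1 lst2 _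
  show cdSimple lst1 lst2 = cdSimple_alt lst1 lst2
  have hlen : (PySem.List.sorted lst2 (fun z => z) false).length = lst2.length :=
    (PySem.List.sorted_perm lst2 (fun z => z) false).length_eq
  simp only [cdSimple, cdSimple_alt]
  rw [outer_A, outer_B]
  simp [hlen]
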